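-- pv_equiv track=rewrite | github.com/duzaao/5-Semestre-BCC-IME-USP | lixo/turing/1_programacao/q2a.py | verifica_ordem_crescente
-- ===== SOURCE A (Python) =====
-- def verifica_ordem_crescente(episodios):
--     ultimo_tempo = -1
--     x = 1
--     for episodio in episodios:
--         if x != episodio[0]:
--             x = episodio[0]
--             ultimo_tempo = -1
--         if episodio[1] <= ultimo_tempo:
--             return False
--         ultimo_tempo = episodio[1]
--     return True
-- ===== SOURCE B (Python) =====
-- def _grupos(episodios):
--     # split into maximal runs of consecutive episodes with the same season
--     grupos = []
--     i = 0
--     while i < len(episodios):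
--         j = i
--         while j < len(episodios) and episodios[j][0] == episodios[i][0]:
--             j += 1
--         grupos.append(episodios[i:j])
--         i = j
--     return grupos
--
-- def verifica_ordem_crescente(episodios):
--     for grupo in _grupos(episodios):
--         ultimo = -1
--         for _, tempo in grupo:
--             if tempo <= ultimo:
--                 return False
--             ultimo = tempo
--     return True
-- ===== Notes on version B (the rewrite author's own statement) =====
-- stated objective: alternative
-- what changed: A's flat single pass with a mutable season/last-time sentinel pair is replaced by first grouping the list into maximal runs of consecutive equal seasons and then checking each run's times strictly increasing from the -1 sentinel.
import Mathlib
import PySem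

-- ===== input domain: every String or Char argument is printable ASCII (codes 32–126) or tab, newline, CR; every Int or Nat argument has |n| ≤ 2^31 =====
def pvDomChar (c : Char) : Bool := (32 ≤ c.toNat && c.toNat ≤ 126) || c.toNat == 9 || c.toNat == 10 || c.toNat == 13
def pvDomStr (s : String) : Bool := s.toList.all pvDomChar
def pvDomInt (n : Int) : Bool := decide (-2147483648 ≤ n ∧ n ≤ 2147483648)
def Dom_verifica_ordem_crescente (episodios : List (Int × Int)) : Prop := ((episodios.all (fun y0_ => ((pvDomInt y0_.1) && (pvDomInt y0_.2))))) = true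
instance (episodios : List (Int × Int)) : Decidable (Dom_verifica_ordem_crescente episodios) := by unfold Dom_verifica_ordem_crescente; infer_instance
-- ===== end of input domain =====

-- B regroups the list into maximal runs of consecutive equal seasons and checks each run
-- against the -1 sentinel, instead of A's flat pass with mutable season/last-time state (objective: alternative).


-- ===== PORT A =====
-- A's loop: state (ultimo_tempo, x); reset ultimo_tempo on season change; early return False.
def goA (ultimo x : Int) : List (Int × Int) → Bool
  | [] => true
  | e :: rest =>
    let x' := if x ≠ e.1 then e.1 else x
    let u' := if x ≠ e.1 then -1 else ultimo
    if e.2 ≤ u' then false else goA e.2 x' rest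

def verifica_ordem_crescente (episodios : List (Int × Int)) : Bool :=
  goA (-1) 1 episodios

-- ===== PORT B =====
-- Source B's _grupos: maximal runs of consecutive equal seasons (inner while = span on the season key).
def grupos : List (Int × Int) → List (List (Int × Int))
  | [] => []
  | e :: rest =>
    (e :: rest.takeWhile (fun f => f.1 == e.1)) :: grupos (rest.dropWhile (fun f => f.1 == e.1))
  termination_by l => l.length
  decreasing_by
    simp only [List.length_cons]
    exact Nat.lt_succ_of_le (List.length_dropWhile_le _ _)

-- Source B's inner loop over one group, ultimo starting at -1 at each call site.
def checkRun (ultimo : Int) : List (Int × Int) → Bool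
  | [] => true
  | e :: r => if e.2 ≤ ultimo then false else checkRun e.2 r

def verifica_ordem_crescente_alt (episodios : List (Int × Int)) : Bool :=
  (grupos episodios).all (checkRun (-1))

-- ===== PRECONDITION & SPEC =====
def Spec_verifica_ordem_crescente (episodios : List (Int × Int)) (out : Bool) : Prop := out = verifica_ordem_crescente_alt episodios
instance (episodios : List (Int × Int)) (out : Bool) : Decidable (Spec_verifica_ordem_crescente episodios out) := by unfold Spec_verifica_ordem_crescente; infer_instance

-- ===== CLAIM (what is proved, stated in full; the proofs are below) =====
def Claim_equal_verifica_ordem_crescente : Prop := ∀ (episodios : List (Int × Int)), Dom_verifica_ordem_crescente episodios → Spec_verifica_ordem_crescente episodios (verifica_ordem_crescente episodios)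

-- ===== LEMMAS AND PROOFS =====

-- With ultimo = -1 at a list head, A's reset is a no-op: x is irrelevant.
theorem goA_neg_one_irrel (l : List (Int × Int)) (x y : Int) :
    goA (-1) x l = goA (-1) y l := by
  cases l with
  | nil => rfl
  | cons e rest =>
    simp only [goA]
    by_cases hx : x = e.1 <;> by_cases hy : y = e.1 <;> simp [hx, hy]

-- If the tail's head (if any) has a season ≠ s, A entering it from season s resets to (-1, fresh x).
theorem goA_enter (rest : List (Int × Int)) (u s : Int)
    (h : ∀ e ∈ rest.head?, e.1 ≠ s) :
    goA u s rest = goA (-1) 1 rest := by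
  cases rest with
  | nil => rfl
  | cons e r =>
    have hne : e.1 ≠ s := h e (by simp)
    simp only [goA]
    have : s ≠ e.1 := fun h' => hne h'.symm
    simp only [if_pos this]
    by_cases h1 : (1 : Int) = e.1 <;> simp [h1]

-- Processing one same-season run followed by a foreign (or empty) tail.
theorem goA_run (run : List (Int × Int)) (rest : List (Int × Int)) (u s : Int)
    (hrun : ∀ e ∈ run, e.1 = s) (hrest : ∀ e ∈ rest.head?, e.1 ≠ s) :
    goA u s (run ++ rest) = (checkRun u run && goA (-1) 1 rest) := by
  induction run generalizing u with
  | nil => simpa [checkRun] using goA_enter rest u s hrest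
  | cons e r ih =>
    have he : e.1 = s := hrun e (by simp)
    simp only [List.cons_append, goA, checkRun, he]
    by_cases hle : e.2 ≤ u
    · simp [hle]
    · have hr : ∀ f ∈ r, f.1 = s := fun f hf => hrun f (List.mem_cons_of_mem _ hf)
      simp [hle, ih e.2 hr]

theorem head?_dropWhile_ne (l : List (Int × Int)) (s : Int) :
    ∀ e ∈ (l.dropWhile (fun f => f.1 == s)).head?, e.1 ≠ s := by
  intro e he
  have h := List.head?_dropWhile_not (p := fun f => f.1 == s) (l := l)
  rw [he] at h
  simpa using h

theorem mem_takeWhile_season (l : List (Int × Int)) (s : Int) :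
    ∀ e ∈ l.takeWhile (fun f => f.1 == s), e.1 = s := by
  intro e he
  have := List.mem_takeWhile_imp he
  simpa using this

theorem goA_eq_alt (l : List (Int × Int)) :
    goA (-1) 1 l = verifica_ordem_crescente_alt l := by
  induction hn : l.length using Nat.strong_induction_on generalizing l with
  | _ n ih =>
    cases l with
    | nil => simp [verifica_ordem_crescente_alt, grupos, goA]
    | cons e rest =>
      have hsplit : rest = rest.takeWhile (fun f => f.1 == e.1) ++ rest.dropWhile (fun f => f.1 == e.1) :=
        (List.takeWhile_append_dropWhile).symm
      have hstep : goA (-1) 1 (e :: rest) = (checkRun (-1) (e :: rest.takeWhile (fun f => f.1 == e.1)) &&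
          goA (-1) 1 (rest.dropWhile (fun f => f.1 == e.1))) := by
        rw [goA_neg_one_irrel (e :: rest) 1 e.1]
        simp only [goA, checkRun, if_neg (by simp : ¬ (e.1 ≠ e.1))]
        by_cases hle : e.2 ≤ -1
        · simp [hle]
        · simp only [hle, ite_false]
          conv_lhs => rw [hsplit]
          exact goA_run _ _ e.2 e.1 (mem_takeWhile_season rest e.1) (head?_dropWhile_ne rest e.1)
      have hlt : (rest.dropWhile (fun f => f.1 == e.1)).length < n := by
        subst hn
        simp only [List.length_cons]
        exact Nat.lt_succ_of_le (List.length_dropWhile_le _ _)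
      rw [hstep, ih _ hlt _ rfl]
      simp [verifica_ordem_crescente_alt, grupos]

-- ===== VERDICT (by name: the statement is the Claim_ definition above) =====
theorem verifica_ordem_crescente_spec : Claim_equal_verifica_ordem_crescente := by
  intro l _
  unfold Spec_verifica_ordem_crescente verifica_ordem_crescente
  exact goA_eq_alt l
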